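-- pv_equiv track=rewrite | github.com/Enjef/Algo | 2400 - 2499/2410 - Maximum Matching of Players With Trainers/2410 - Maximum Matching of Players With Trainers.py | matchPlayersAndTrainers_best_memory
-- ===== SOURCE A (Python) =====
-- from typing import List
--
-- def matchPlayersAndTrainers_best_memory(players: List[int], trainers: List[int]) -> int:
--     players.sort()
--     trainers.sort()
--     count = 0
--     for player in players:
--         for trainer in trainers:
--             if player <= trainer:
--                 count += 1
--                 trainers.remove(trainer)
--                 break
--     return count
-- ===== SOURCE B (Python) =====
-- def matchPlayersAndTrainers_best_memory(players, trainers):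
--     ps = sorted(players)
--     ts = sorted(trainers)
--     i = 0
--     for t in ts:
--         if i < len(ps) and ps[i] <= t:
--             i += 1
--     return i
-- ===== Notes on version B (the rewrite author's own statement) =====
-- stated objective: faster
-- what changed: Replaced the per-player inner scan with remove() over the trainer list by a single two-pointer sweep over the sorted trainers, advancing a player index.
import Mathlib
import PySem

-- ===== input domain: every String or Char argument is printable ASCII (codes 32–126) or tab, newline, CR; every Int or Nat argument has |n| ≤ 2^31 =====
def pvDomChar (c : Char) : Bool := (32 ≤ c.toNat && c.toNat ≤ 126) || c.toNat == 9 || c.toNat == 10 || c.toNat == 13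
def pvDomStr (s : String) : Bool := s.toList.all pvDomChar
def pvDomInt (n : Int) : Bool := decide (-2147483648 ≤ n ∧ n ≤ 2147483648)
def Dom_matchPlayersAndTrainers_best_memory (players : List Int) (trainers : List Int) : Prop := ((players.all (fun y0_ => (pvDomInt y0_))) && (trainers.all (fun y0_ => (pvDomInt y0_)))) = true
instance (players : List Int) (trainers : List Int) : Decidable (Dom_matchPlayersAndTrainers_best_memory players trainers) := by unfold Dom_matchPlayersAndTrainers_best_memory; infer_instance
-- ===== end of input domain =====

-- B replaces A's per-player inner scan-and-remove by a single two-pointer sweep over the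
-- sorted trainers (objective: faster, asymptotic). Equivalence is about the RETURN value only:
-- Python A sorts both argument lists in place and removes matched trainers; B does not mutate.

-- ===== PORT A =====
-- inner 'for trainer in trainers: if player <= trainer: remove & break' — scans `scan`,
-- removes the found value from `full` (trainers.remove); the found value is a member of
-- `full`, so remove? is some and `.getD full` is exact.
def pvFindRemove (player : Int) (full : List Int) : List Int → Option (List Int)
  | [] => none
  | t :: rest =>
    if player ≤ t then some ((PySem.List.remove? full t).getD full)
    else pvFindRemove player full rest

def matchPlayersAndTrainers_best_memory (players : List Int) (trainers : List Int) : Int :=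
  let ps := PySem.List.sorted players (fun x => x) false
  let ts := PySem.List.sorted trainers (fun x => x) false
  (ps.foldl (fun (st : List Int × Int) player =>
      match pvFindRemove player st.1 st.1 with
      | some ts' => (ts', st.2 + 1)
      | none => st) (ts, 0)).2

-- ===== PORT B =====
-- two-pointer sweep: walk the sorted trainers, advance the player pointer on a match
def pvSweep : List Int → List Int → Int
  | _, [] => 0
  | [], _ :: _ => 0
  | p :: ps, t :: ts => if p ≤ t then 1 + pvSweep ps ts else pvSweep (p :: ps) ts

def matchPlayersAndTrainers_best_memory_alt (players : List Int) (trainers : List Int) : Int :=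
  pvSweep (PySem.List.sorted players (fun x => x) false)
          (PySem.List.sorted trainers (fun x => x) false)
-- ===== PRECONDITION & SPEC =====
def Spec_matchPlayersAndTrainers_best_memory (players : List Int) (trainers : List Int) (out : Int) : Prop := out = matchPlayersAndTrainers_best_memory_alt players trainers
instance (players : List Int) (trainers : List Int) (out : Int) : Decidable (Spec_matchPlayersAndTrainers_best_memory players trainers out) := by unfold Spec_matchPlayersAndTrainers_best_memory; infer_instance

-- ===== CLAIM (what is proved, stated in full; the proofs are below) =====
def Claim_equal_matchPlayersAndTrainers_best_memory : Prop := ∀ (players : List Int) (trainers : List Int), Dom_matchPlayersAndTrainers_best_memory players trainers → Spec_matchPlayersAndTrainers_best_memory players trainers (matchPlayersAndTrainers_best_memory players trainers)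

-- ===== LEMMAS AND PROOFS =====

lemma findRemove_none (p : Int) (full : List Int) (scan : List Int)
    (h : ∀ t ∈ scan, t < p) : pvFindRemove p full scan = none := by
  induction scan with
  | nil => rfl
  | cons t rest ih =>
    have ht := h t (by simp)
    simp [pvFindRemove, not_le.mpr ht]
    exact ih (fun x hx => h x (by simp [hx]))

lemma findRemove_found (p : Int) (full : List Int) (lo : List Int) (t : Int) (rest : List Int)
    (hlo : ∀ x ∈ lo, x < p) (ht : p ≤ t) :
    pvFindRemove p full (lo ++ t :: rest) = some ((PySem.List.remove? full t).getD full) := by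
  induction lo with
  | nil => simp [pvFindRemove, ht]
  | cons x lo ih =>
    have hx := hlo x (by simp)
    simp [pvFindRemove, not_le.mpr hx]
    exact ih (fun y hy => hlo y (by simp [hy]))

lemma sweep_skip (p : Int) (ps : List Int) (lo ts : List Int)
    (hlo : ∀ x ∈ lo, x < p) : pvSweep (p :: ps) (lo ++ ts) = pvSweep (p :: ps) ts := by
  induction lo with
  | nil => rfl
  | cons x lo ih =>
    have hx := hlo x (by simp)
    simp [pvSweep, not_le.mpr hx]
    exact ih (fun y hy => hlo y (by simp [hy]))

lemma sweep_all_lt (p : Int) (ps : List Int) (ts : List Int)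
    (h : ∀ t ∈ ts, t < p) : pvSweep (p :: ps) ts = 0 := by
  have := sweep_skip p ps ts [] h
  simpa using this

-- the A-side loop step, named for the proofs
def pvAStep (st : List Int × Int) (player : Int) : List Int × Int :=
  match pvFindRemove player st.1 st.1 with
  | some ts' => (ts', st.2 + 1)
  | none => st

lemma dropWhile_lt_head_ge (p t : Int) (rest rest2 : List Int)
    (h : rest.dropWhile (fun x => decide (x < p)) = t :: rest2) : p ≤ t := by
  induction rest with
  | nil => simp [List.dropWhile] at h
  | cons a l ih =>
    rw [List.dropWhile_cons] at h
    by_cases ha : a < p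
    · simp [ha] at h; exact ih h
    · simp [ha] at h; omega

-- main invariant: A's fold over the sorted players, run on lo ++ rest where every element of
-- lo is below every remaining player, counts exactly what the two-pointer sweep counts on rest
lemma key_lemma : ∀ (ps : List Int) (lo rest : List Int) (c : Int),
    rest.Pairwise (· ≤ ·) → ps.Pairwise (· ≤ ·) →
    (∀ x ∈ lo, ∀ q ∈ ps, x < q) →
    (ps.foldl pvAStep (lo ++ rest, c)).2 = c + pvSweep ps rest := by
  intro ps
  induction ps with
  | nil => intro lo rest c _ _ _; cases rest <;> simp [pvSweep]
  | cons p ps ih =>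
    intro lo rest c hrest hps hlo
    have hps' : ps.Pairwise (· ≤ ·) := hps.tail
    have hple : ∀ q ∈ ps, p ≤ q := fun q hq => (List.pairwise_cons.mp hps).1 q hq
    have hlop : ∀ x ∈ lo, x < p := fun x hx => hlo x hx p (by simp)
    set lo2 := rest.takeWhile (fun t => decide (t < p)) with hlo2
    set hi := rest.dropWhile (fun t => decide (t < p)) with hhi
    have hsplit : lo2 ++ hi = rest := List.takeWhile_append_dropWhile
    have hlo2lt : ∀ x ∈ lo2, x < p := by
      intro x hx
      have := List.mem_takeWhile_imp hx
      simpa using this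
    cases hcase : hi with
    | nil =>
      -- no trainer ≥ p: the step is a no-op, and no later player can match either
      have hrestlt : ∀ t ∈ rest, t < p := by
        intro t htm
        rw [← hsplit, hcase] at htm
        simp at htm
        exact hlo2lt t htm
      have hnone : pvFindRemove p (lo ++ rest) (lo ++ rest) = none :=
        findRemove_none p _ _ (by
          intro t htm
          rcases List.mem_append.mp htm with h1 | h1
          · exact hlo t h1 p (by simp)
          · exact hrestlt t h1)
      have hstep : pvAStep (lo ++ rest, c) p = (lo ++ rest, c) := by
        simp [pvAStep, hnone]
      rw [List.foldl_cons, hstep, sweep_all_lt p ps rest hrestlt]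
      have := ih (lo ++ rest) [] c (by simp) hps' (by
        intro x hx q hq
        rcases List.mem_append.mp hx with h1 | h1
        · exact hlo x h1 q (by simp [hq])
        · exact lt_of_lt_of_le (hrestlt x h1) (hple q hq))
      simpa [pvSweep] using this
    | cons t rest2 =>
      -- first trainer ≥ p is t; A removes exactly it (sorted, so first occurrence)
      have hpt : p ≤ t := dropWhile_lt_head_ge p t rest rest2 (by rw [← hhi, hcase])
      have hrest_eq : rest = lo2 ++ t :: rest2 := by rw [← hsplit, hcase]
      have htnotlo : t ∉ lo ++ lo2 := by
        intro hmem
        rcases List.mem_append.mp hmem with h1 | h1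
        · exact absurd hpt (not_le.mpr (hlo t h1 p (by simp)))
        · exact absurd hpt (not_le.mpr (hlo2lt t h1))
      have hfull_eq : lo ++ rest = (lo ++ lo2) ++ t :: rest2 := by
        rw [hrest_eq]; simp
      have hfound : pvFindRemove p (lo ++ rest) (lo ++ rest) =
          some ((PySem.List.remove? (lo ++ rest) t).getD (lo ++ rest)) := by
        rw [hfull_eq]
        exact findRemove_found p _ _ t rest2 (by
          intro x hx
          rcases List.mem_append.mp hx with h1 | h1
          · exact hlo x h1 p (by simp)
          · exact hlo2lt x h1) hpt
      have hmem : t ∈ lo ++ rest := by rw [hfull_eq]; simp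
      have herase : (lo ++ rest).erase t = (lo ++ lo2) ++ rest2 := by
        rw [hfull_eq, List.erase_append_right _ htnotlo, List.erase_cons_head]
      have hremove : (PySem.List.remove? (lo ++ rest) t).getD (lo ++ rest) = (lo ++ lo2) ++ rest2 := by
        rw [PySem.List.remove?_eq_some_erase _ t hmem, Option.getD_some, herase]
      have hstep : pvAStep (lo ++ rest, c) p = ((lo ++ lo2) ++ rest2, c + 1) := by
        simp [pvAStep, hfound, hremove]
      have hrest2 : rest2.Pairwise (· ≤ ·) := by
        have : (lo2 ++ t :: rest2).Pairwise (· ≤ ·) := hrest_eq ▸ hrest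
        exact (List.pairwise_cons.mp (List.pairwise_append.mp this).2.1).2
      rw [List.foldl_cons, hstep,
        ih (lo ++ lo2) rest2 (c + 1) hrest2 hps' (by
          intro x hx q hq
          rcases List.mem_append.mp hx with h1 | h1
          · exact hlo x h1 q (by simp [hq])
          · exact lt_of_lt_of_le (hlo2lt x h1) (hple q hq))]
      rw [hrest_eq, sweep_skip p ps lo2 (t :: rest2) hlo2lt]
      simp [pvSweep, hpt]
      ring

-- ===== VERDICT (by name: the statement is the Claim_ definition above) =====
theorem matchPlayersAndTrainers_best_memory_spec : Claim_equal_matchPlayersAndTrainers_best_memory := by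
  intro players trainers _
  unfold Spec_matchPlayersAndTrainers_best_memory matchPlayersAndTrainers_best_memory matchPlayersAndTrainers_best_memory_alt
  have h := key_lemma (PySem.List.sorted players (fun x => x) false) []
    (PySem.List.sorted trainers (fun x => x) false) 0
    (by simpa using PySem.List.sorted_pairwise trainers (fun x => x))
    (by simpa using PySem.List.sorted_pairwise players (fun x => x))
    (by simp)
  simpa [pvAStep] using h
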